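-- pv_equiv track=rewrite | github.com/yannleretaille/awg-openwrt-repos | scripts/generate_repos_md.py | group_rolling_rows
-- ===== SOURCE A (Python) =====
-- from typing import Dict, List, Tuple
--
-- def group_rolling_rows(
--     opkg_roll: List[Tuple[str, str, str, str]],
--     apk_roll: List[Tuple[str, str, str, str]],
-- ) -> Dict[str, List[Tuple[str, str, str, str]]]:
--     merged: Dict[Tuple[str, str, str], Dict[str, str]] = {}
--     for ow, target, subtarget, rel_url in opkg_roll:
--         merged.setdefault((ow, target, subtarget), {})["opkg"] = rel_url
--     for ow, target, subtarget, rel_url in apk_roll: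
--         merged.setdefault((ow, target, subtarget), {})["apk"] = rel_url
--
--     by_version: Dict[str, List[Tuple[str, str, str, str]]] = {}
--     for (ow, target, subtarget), urls in sorted(merged.items()):
--         by_version.setdefault(ow, []).append(
--             (target, subtarget, urls.get("opkg", ""), urls.get("apk", ""))
--         )
--     return by_version
-- ===== SOURCE B (Python) =====
-- from typing import Dict, List, Tuple
--
-- def group_rolling_rows(
--     opkg_roll: List[Tuple[str, str, str, str]],
--     apk_roll: List[Tuple[str, str, str, str]],
-- ) -> Dict[str, List[Tuple[str, str, str, str]]]:
--     # No merge dict at all: decorate every input row as ((ow, target, subtarget), src, pos, url)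
--     # with src 0 = opkg, 1 = apk, sort once, and resolve duplicates ('last row wins', exactly
--     # Python's dict-overwrite) and BOTH grouping levels in one linear scan over runs:
--     # an outer run per ow, an inner run per full key, innermost last-wins url accumulation.
--     events = sorted(
--         [((ow, t, s), 0, i, u) for i, (ow, t, s, u) in enumerate(opkg_roll)]
--         + [((ow, t, s), 1, i, u) for i, (ow, t, s, u) in enumerate(apk_roll)]
--     )
--     out: Dict[str, List[Tuple[str, str, str, str]]] = {}
--     i, n = 0, len(events)
--     while i < n:
--         ow = events[i][0][0]
--         rows: List[Tuple[str, str, str, str]] = []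
--         while i < n and events[i][0][0] == ow:
--             key = events[i][0]
--             opkg = apk = ""
--             while i < n and events[i][0] == key:
--                 if events[i][1] == 0:
--                     opkg = events[i][3]
--                 else:
--                     apk = events[i][3]
--                 i += 1
--             rows.append((key[1], key[2], opkg, apk))
--         out[ow] = rows
--     return out
-- ===== Notes on version B (the rewrite author's own statement) =====
-- stated objective: alternative
-- what changed: B uses no merge dict at all: it decorates each input row as ((ow,target,subtarget), source-tag, position, url), sorts that one list, and produces duplicate resolution (last-wins via the position tag), the opkg/apk pairing and both grouping levels in a single linear run scan over the sorted list, where A builds nested dicts with setdefault and then sorts and regroups their items.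
import Mathlib
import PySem

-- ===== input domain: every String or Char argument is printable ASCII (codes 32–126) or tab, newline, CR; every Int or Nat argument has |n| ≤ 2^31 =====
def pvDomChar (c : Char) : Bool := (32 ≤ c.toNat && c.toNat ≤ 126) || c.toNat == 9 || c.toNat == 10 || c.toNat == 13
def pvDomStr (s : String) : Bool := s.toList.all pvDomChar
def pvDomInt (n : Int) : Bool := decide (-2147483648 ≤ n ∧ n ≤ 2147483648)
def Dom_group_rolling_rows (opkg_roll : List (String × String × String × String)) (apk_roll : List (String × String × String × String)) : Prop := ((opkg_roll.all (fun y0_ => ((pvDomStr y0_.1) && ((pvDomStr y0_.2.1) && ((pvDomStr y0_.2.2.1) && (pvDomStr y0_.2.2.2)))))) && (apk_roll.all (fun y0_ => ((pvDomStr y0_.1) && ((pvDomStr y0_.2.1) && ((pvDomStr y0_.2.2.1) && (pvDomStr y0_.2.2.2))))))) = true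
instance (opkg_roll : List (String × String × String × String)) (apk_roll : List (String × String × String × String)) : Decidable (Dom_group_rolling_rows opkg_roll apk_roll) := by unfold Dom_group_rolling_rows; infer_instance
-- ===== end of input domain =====

-- B builds no merge dict at all: it decorates each row with a source tag and its position,
-- sorts that single list once, and does last-wins duplicate resolution, opkg/apk pairing and
-- both grouping levels in one linear run scan; alternative, same asymptotic cost.

-- Python's lexicographic comparison of a (str, str, str) tuple, as a Lex key for sorted().
def pvKey3 (k : String × String × String) : Lex (String × Lex (String × String)) :=
  toLex (k.1, toLex (k.2.1, k.2.2))

-- ===== PORT A =====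
def group_rolling_rows (opkg_roll : List (String × String × String × String)) (apk_roll : List (String × String × String × String)) : List (String × List (String × String × String × String)) :=
  -- merged.setdefault(key, {})["opkg"] = url  ==  merged[key] = merged.get(key, {}) with "opkg" set,
  -- keeping the key's position: exactly Dict.modify.
  let m1 : PySem.Dict (String × String × String) (PySem.Dict String String) :=
    opkg_roll.foldl (fun d r => d.modify (r.1, r.2.1, r.2.2.1) PySem.Dict.empty
      (fun u => u.insert "opkg" r.2.2.2)) PySem.Dict.empty
  let m2 : PySem.Dict (String × String × String) (PySem.Dict String String) :=
    apk_roll.foldl (fun d r => d.modify (r.1, r.2.1, r.2.2.1) PySem.Dict.empty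
      (fun u => u.insert "apk" r.2.2.2)) m1
  -- sorted(merged.items()): Python compares the (key, value) tuples; the keys are distinct
  -- (dict keys), so the comparison is exactly lexicographic on the key triple and the url
  -- dict values are never compared — sorting by the key triple is exact.
  let its := PySem.List.sorted m2.items (fun p => pvKey3 p.1)
  let byv : PySem.Dict String (List (String × String × String × String)) :=
    its.foldl (fun bv p => bv.modify p.1.1 ([] : List (String × String × String × String))
      (fun l => l ++ [(p.1.2.1, p.1.2.2, p.2.getD "opkg" "", p.2.getD "apk" "")])) PySem.Dict.empty
  byv.items

-- ===== PORT B =====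
-- Source B's sorted(events) compares 4-tuples ((ow,t,s), src, idx, url); the (key, src, idx)
-- prefix is distinct across events (idx = enumerate position, unique per src), so the url
-- component is never reached — sorting by that lexicographic prefix is exact.
def pvFullKey (e : (String × String × String) × Int × Int × String) : Lex (Lex (String × Lex (String × String)) × Lex (Int × Int)) :=
  toLex (pvKey3 e.1, toLex (e.2.1, e.2.2.1))

-- innermost while: last-wins accumulation of the (opkg, apk) pair over one key run
def pvUrlStep (p : String × String) (e : (String × String × String) × Int × Int × String) : String × String :=
  if e.2.1 == 0 then (e.2.2.2, p.2) else (p.1, e.2.2.2)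

def pvUrlFold (run : List ((String × String × String) × Int × Int × String)) : String × String :=
  run.foldl pvUrlStep ("", "")

-- middle while over one ow run: each step consumes the maximal run of the current full key
-- (takeWhile) and resumes after it (dropWhile), appending one row
def pvMidLoop : List ((String × String × String) × Int × Int × String) → List (String × String × String × String)
  | [] => []
  | e :: rest =>
    let run := ((e :: rest)).takeWhile (fun q => q.1 == e.1)
    let sfx := ((e :: rest)).dropWhile (fun q => q.1 == e.1)
    (e.1.2.1, e.1.2.2, (pvUrlFold run).1, (pvUrlFold run).2) :: pvMidLoop sfx
termination_by L => L.length
decreasing_by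
  simp only [List.dropWhile_cons, beq_self_eq_true, if_true]
  exact Nat.lt_succ_of_le (List.length_dropWhile_le _ _)

-- outer while: one maximal ow run per step; out[ow] = rows
def pvOutLoop : List ((String × String × String) × Int × Int × String) → PySem.Dict String (List (String × String × String × String)) → PySem.Dict String (List (String × String × String × String))
  | [], out => out
  | e :: rest, out =>
    let run := ((e :: rest)).takeWhile (fun q => q.1.1 == e.1.1)
    let sfx := ((e :: rest)).dropWhile (fun q => q.1.1 == e.1.1)
    pvOutLoop sfx (out.insert e.1.1 (pvMidLoop run))
termination_by L _ => L.length
decreasing_by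
  simp only [List.dropWhile_cons, beq_self_eq_true, if_true]
  exact Nat.lt_succ_of_le (List.length_dropWhile_le _ _)

def group_rolling_rows_alt (opkg_roll : List (String × String × String × String)) (apk_roll : List (String × String × String × String)) : List (String × List (String × String × String × String)) :=
  let events : List ((String × String × String) × Int × Int × String) :=
    (PySem.List.enumerate opkg_roll 0).map (fun p => ((p.2.1, p.2.2.1, p.2.2.2.1), (0 : Int), p.1, p.2.2.2.2))
      ++ (PySem.List.enumerate apk_roll 0).map (fun p => ((p.2.1, p.2.2.1, p.2.2.2.1), (1 : Int), p.1, p.2.2.2.2))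
  let evs := PySem.List.sorted events pvFullKey
  (pvOutLoop evs PySem.Dict.empty).items

-- ===== PRECONDITION & SPEC =====
def Spec_group_rolling_rows (opkg_roll : List (String × String × String × String)) (apk_roll : List (String × String × String × String)) (out : List (String × List (String × String × String × String))) : Prop := out = group_rolling_rows_alt opkg_roll apk_roll
instance (opkg_roll : List (String × String × String × String)) (apk_roll : List (String × String × String × String)) (out : List (String × List (String × String × String × String))) : Decidable (Spec_group_rolling_rows opkg_roll apk_roll out) := by unfold Spec_group_rolling_rows; infer_instance

-- ===== CLAIM (what is proved, stated in full; the proofs are below) =====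
def Claim_equal_group_rolling_rows : Prop := ∀ (opkg_roll : List (String × String × String × String)) (apk_roll : List (String × String × String × String)), Dom_group_rolling_rows opkg_roll apk_roll → Spec_group_rolling_rows opkg_roll apk_roll (group_rolling_rows opkg_roll apk_roll)

-- ===== LEMMAS AND PROOFS =====

-- proof-layer names for the two programs' intermediate data (definitionally the ports' lets)
def pvStepO (d : PySem.Dict (String × String × String) (PySem.Dict String String)) (r : String × String × String × String) : PySem.Dict (String × String × String) (PySem.Dict String String) :=
  d.modify (r.1, r.2.1, r.2.2.1) PySem.Dict.empty (fun u => u.insert "opkg" r.2.2.2)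

def pvStepA (d : PySem.Dict (String × String × String) (PySem.Dict String String)) (r : String × String × String × String) : PySem.Dict (String × String × String) (PySem.Dict String String) :=
  d.modify (r.1, r.2.1, r.2.2.1) PySem.Dict.empty (fun u => u.insert "apk" r.2.2.2)

def pvM2 (opkg_roll apk_roll : List (String × String × String × String)) : PySem.Dict (String × String × String) (PySem.Dict String String) :=
  apk_roll.foldl pvStepA (opkg_roll.foldl pvStepO PySem.Dict.empty)

def pvIts (opkg_roll apk_roll : List (String × String × String × String)) : List ((String × String × String) × PySem.Dict String String) :=
  PySem.List.sorted (pvM2 opkg_roll apk_roll).items (fun p => pvKey3 p.1)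

def pvE0 (l : List (String × String × String × String)) : List ((String × String × String) × Int × Int × String) :=
  (PySem.List.enumerate l 0).map (fun p => ((p.2.1, p.2.2.1, p.2.2.2.1), (0 : Int), p.1, p.2.2.2.2))

def pvE1 (l : List (String × String × String × String)) : List ((String × String × String) × Int × Int × String) :=
  (PySem.List.enumerate l 0).map (fun p => ((p.2.1, p.2.2.1, p.2.2.2.1), (1 : Int), p.1, p.2.2.2.2))

def pvEvs (opkg_roll apk_roll : List (String × String × String × String)) : List ((String × String × String) × Int × Int × String) :=
  PySem.List.sorted (pvE0 opkg_roll ++ pvE1 apk_roll) pvFullKey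

lemma pvA_closed (o a : List (String × String × String × String)) :
    group_rolling_rows o a = ((pvIts o a).foldl (fun bv p => bv.modify p.1.1 ([] : List (String × String × String × String))
      (fun l => l ++ [(p.1.2.1, p.1.2.2, p.2.getD "opkg" "", p.2.getD "apk" "")])) PySem.Dict.empty).items := rfl

lemma pvB_closed (o a : List (String × String × String × String)) :
    group_rolling_rows_alt o a = (pvOutLoop (pvEvs o a) PySem.Dict.empty).items := rfl

-- ---------- generic helpers about PySem.Set and sorted runs ----------

lemma pvEqPw {α κ : Type} [LinearOrder κ] (key : α → κ) {l₁ l₂ : List α} (hp : l₂.Perm l₁)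
    (h₁ : l₁.Pairwise (fun a b => key a < key b)) (h₂ : l₂.Pairwise (fun a b => key a < key b)) :
    l₁ = l₂ :=
  (PySem.List.sorted_eq_of_perm_of_pairwise_lt l₁ l₁ key (List.Perm.refl l₁) h₁).symm.trans
    (PySem.List.sorted_eq_of_perm_of_pairwise_lt l₁ l₂ key hp h₂)

lemma pvNodup_of_pairwise_lt {α κ : Type} [LinearOrder κ] (key : α → κ) {l : List α}
    (h : l.Pairwise (fun a b => key a < key b)) : l.Nodup :=
  h.imp (fun hlt => by rintro rfl; exact absurd hlt (lt_irrefl _))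

lemma pvAdd_cons_ne {β : Type} [BEq β] [LawfulBEq β] (c y : β) (s : List β) (h : y ≠ c) :
    PySem.Set.add (c :: s) y = c :: PySem.Set.add s y := by
  have hcy : (y == c) = false := by simpa using h
  simp only [PySem.Set.add]
  have hcc : PySem.Set.contains (c :: s) y = PySem.Set.contains s y := by
    simp only [PySem.Set.contains, List.contains_cons, hcy, Bool.false_or]
  rw [hcc]
  split_ifs <;> simp

lemma pvFoldlAdd_cons {β : Type} [BEq β] [LawfulBEq β] (c : β) (ys : List β) (hy : c ∉ ys) :
    ∀ (s : List β), List.foldl PySem.Set.add (c :: s) ys = c :: List.foldl PySem.Set.add s ys := by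
  induction ys with
  | nil => intro s; rfl
  | cons y t ih =>
    intro s
    have hyc : y ≠ c := by rintro rfl; exact hy (List.mem_cons_self ..)
    rw [List.foldl_cons, List.foldl_cons, pvAdd_cons_ne c y s hyc,
        ih (fun h => hy (List.mem_cons_of_mem _ h))]

lemma pvFoldlAdd_all_eq {β : Type} [BEq β] [LawfulBEq β] (c : β) (xs : List β) (h : ∀ x ∈ xs, x = c) :
    List.foldl PySem.Set.add [c] xs = [c] := by
  induction xs with
  | nil => rfl
  | cons x t ih =>
    have hx : x = c := h x (List.mem_cons_self ..)
    subst hx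
    rw [List.foldl_cons]
    have : PySem.Set.add [x] x = [x] := by simp [PySem.Set.add]
    rw [this]
    exact ih (fun y hy => h y (List.mem_cons_of_mem _ hy))

lemma pvOfList_head {β : Type} [BEq β] [LawfulBEq β] (c : β) (xs ys : List β)
    (hx : ∀ x ∈ xs, x = c) (hne : xs ≠ []) (hy : c ∉ ys) :
    PySem.Set.ofList (xs ++ ys) = c :: PySem.Set.ofList ys := by
  rw [PySem.Set.ofList_eq_foldl, PySem.Set.ofList_eq_foldl, List.foldl_append]
  cases xs with
  | nil => exact absurd rfl hne
  | cons x t =>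
    have hx0 : x = c := hx x (List.mem_cons_self ..)
    subst hx0
    rw [List.foldl_cons]
    have h1 : PySem.Set.add [] x = [x] := rfl
    rw [h1, pvFoldlAdd_all_eq x t (fun y hy => hx y (List.mem_cons_of_mem _ hy)),
        pvFoldlAdd_cons x ys hy []]

-- dropWhile on a run: after dropping the run of the head's tag, all keys are strictly larger
lemma pvDropWhile_lt {α β κ : Type} [BEq β] [LawfulBEq β] [LinearOrder κ]
    (tag : α → β) (key : α → κ) (hco : ∀ x y : α, tag x = tag y ↔ key x = key y)
    (c : α) (l : List α) (hpw : l.Pairwise (fun p q => key p ≤ key q)) (hle : ∀ q ∈ l, key c ≤ key q) :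
    ∀ q ∈ l.dropWhile (fun q => tag q == tag c), key c < key q := by
  induction l with
  | nil => intro q hq; simp at hq
  | cons z t ih =>
    obtain ⟨hz, ht⟩ := List.pairwise_cons.mp hpw
    by_cases hzc : (tag z == tag c) = true
    · rw [List.dropWhile_cons, if_pos hzc]
      exact ih ht (fun q hq => hle q (List.mem_cons_of_mem _ hq))
    · rw [List.dropWhile_cons, if_neg hzc]
      have hzlt : key c < key z := by
        refine lt_of_le_of_ne (hle z (List.mem_cons_self ..)) ?_
        intro he
        exact hzc (by simp [(hco z c).mpr he.symm])
      intro q hq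
      rcases List.mem_cons.mp hq with rfl | hq'
      · exact hzlt
      · exact lt_of_lt_of_le hzlt (hz q hq')

-- dedup of a key-sorted list is strictly key-sorted
lemma pvOfList_pairwise_lt {β κ : Type} [BEq β] [LawfulBEq β] [LinearOrder κ]
    (key : β → κ) (hinj : ∀ x y : β, key x = key y → x = y) :
    ∀ (n : Nat) (l : List β), l.length ≤ n → l.Pairwise (fun a b => key a ≤ key b) →
      (PySem.Set.ofList l).Pairwise (fun a b => key a < key b) := by
  intro n
  induction n with
  | zero =>
    intro l hl _
    rw [List.length_eq_zero_iff.mp (Nat.le_zero.mp hl)]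
    exact List.Pairwise.nil
  | succ m ih =>
    intro l hl hpw
    cases l with
    | nil => exact List.Pairwise.nil
    | cons x t =>
      obtain ⟨hx, ht⟩ := List.pairwise_cons.mp hpw
      have hdec : t = t.takeWhile (fun y => y == x) ++ t.dropWhile (fun y => y == x) :=
        (List.takeWhile_append_dropWhile).symm
      have htd : ∀ q ∈ t.dropWhile (fun y => y == x), key x < key q := by
        have := pvDropWhile_lt (tag := fun y : β => y) key (fun x y => ⟨fun h => congrArg key h, hinj x y⟩) x t ht hx
        simpa using this
      have hxnot : x ∉ t.dropWhile (fun y => y == x) := by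
        intro hmem
        exact absurd (htd x hmem) (lt_irrefl _)
      have hofl : PySem.Set.ofList (x :: t) = x :: PySem.Set.ofList (t.dropWhile (fun y => y == x)) := by
        rw [PySem.Set.ofList_eq_foldl, List.foldl_cons]
        have h1 : PySem.Set.add [] x = [x] := rfl
        rw [h1]
        conv_lhs => rw [hdec, List.foldl_append]
        rw [pvFoldlAdd_all_eq x _ (fun y hy => by simpa using List.mem_takeWhile_imp hy),
            pvFoldlAdd_cons x _ hxnot [], ← PySem.Set.ofList_eq_foldl]
      rw [hofl]
      refine List.pairwise_cons.mpr ⟨?_, ?_⟩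
      · intro q hq
        exact htd q ((PySem.Set.mem_ofList _ _).mp hq)
      · refine ih _ ?_ ?_
        · have := List.length_dropWhile_le (fun y => y == x) t
          have h2 : t.length ≤ m := by simpa using hl
          omega
        · exact ht.sublist (List.dropWhile_sublist _)

-- ---------- key-order facts ----------

lemma pvKey3_inj {x y : String × String × String} (h : pvKey3 x = pvKey3 y) : x = y := by
  obtain ⟨x1, x2, x3⟩ := x
  obtain ⟨y1, y2, y3⟩ := y
  simp only [pvKey3, toLex_inj, Prod.mk.injEq] at h
  simp [h.1, h.2.1, h.2.2]

lemma pvFullKey_parts {e f : (String × String × String) × Int × Int × String}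
    (h : pvFullKey e = pvFullKey f) : e.1 = f.1 ∧ e.2.1 = f.2.1 ∧ e.2.2.1 = f.2.2.1 := by
  simp only [pvFullKey, toLex_inj, Prod.mk.injEq] at h
  exact ⟨pvKey3_inj h.1, h.2.1, h.2.2⟩

lemma pvKey3_le_fst {x y : String × String × String} (h : pvKey3 x ≤ pvKey3 y) : x.1 ≤ y.1 := by
  rcases Prod.Lex.le_iff.mp h with h1 | ⟨h1, _⟩
  · exact le_of_lt h1
  · exact le_of_eq h1

lemma pvFullKey_le_key3 {e f : (String × String × String) × Int × Int × String}
    (h : pvFullKey e ≤ pvFullKey f) : pvKey3 e.1 ≤ pvKey3 f.1 := by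
  rcases Prod.Lex.le_iff.mp h with h1 | ⟨h1, _⟩
  · exact le_of_lt h1
  · exact le_of_eq h1

lemma pvFullKey_lt_of_src {e f : (String × String × String) × Int × Int × String}
    (h1 : e.1 = f.1) (h2 : e.2.1 < f.2.1) : pvFullKey e < pvFullKey f := by
  simp only [pvFullKey, Prod.Lex.lt_iff, ofLex_toLex]
  exact Or.inr ⟨by rw [h1], Or.inl h2⟩

lemma pvFullKey_lt_of_idx {e f : (String × String × String) × Int × Int × String}
    (h1 : e.1 = f.1) (h2 : e.2.1 = f.2.1) (h3 : e.2.2.1 < f.2.2.1) : pvFullKey e < pvFullKey f := by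
  simp only [pvFullKey, Prod.Lex.lt_iff, ofLex_toLex]
  exact Or.inr ⟨by rw [h1], Or.inr ⟨by rw [h2], h3⟩⟩

-- ---------- the two run-scan loops, in closed form ----------

-- middle loop: on a key-sorted ow run it produces one row per distinct key, in order
lemma pvMid_eq : ∀ (L : List ((String × String × String) × Int × Int × String)),
    L.Pairwise (fun p q => pvKey3 p.1 ≤ pvKey3 q.1) →
    pvMidLoop L = (PySem.Set.ofList (L.map (fun e => e.1))).map
      (fun k => (k.2.1, k.2.2, (pvUrlFold (L.filter (fun q => q.1 == k))).1,
        (pvUrlFold (L.filter (fun q => q.1 == k))).2)) := by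
  intro L
  induction L using pvMidLoop.induct with
  | case1 => intro _; simp [pvMidLoop]
  | case2 e rest sfx ih =>
    intro hs
    have hsfx_eq : sfx = rest.dropWhile (fun q => q.1 == e.1) := by
      show ((e :: rest)).dropWhile (fun q => q.1 == e.1) = _
      rw [List.dropWhile_cons, if_pos (by simp)]
    have hrun_all : ∀ q ∈ ((e :: rest)).takeWhile (fun q => q.1 == e.1), q.1 = e.1 := by
      intro q hq
      have := List.mem_takeWhile_imp hq
      simpa using this
    obtain ⟨hz, hrest_pw⟩ := List.pairwise_cons.mp hs
    have hsfx_lt : ∀ q ∈ sfx, pvKey3 e.1 < pvKey3 q.1 := by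
      rw [hsfx_eq]
      exact pvDropWhile_lt (fun q : (String × String × String) × Int × Int × String => q.1)
        (fun q => pvKey3 q.1) (fun x y => ⟨fun h => congrArg pvKey3 h, fun h => pvKey3_inj h⟩)
        e rest hrest_pw hz
    have hLdecomp : e :: rest = ((e :: rest)).takeWhile (fun q => q.1 == e.1) ++ sfx := by
      show _ = _ ++ ((e :: rest)).dropWhile (fun q => q.1 == e.1)
      rw [List.takeWhile_append_dropWhile]
    have hfilter_k : (e :: rest).filter (fun q => q.1 == e.1)
        = ((e :: rest)).takeWhile (fun q => q.1 == e.1) := by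
      conv_lhs => rw [hLdecomp]
      rw [List.filter_append,
          List.filter_eq_self.mpr (fun q hq => by simp [hrun_all q hq]),
          List.filter_eq_nil_iff.mpr (fun q hq => by
            simp only [beq_iff_eq]
            intro h
            exact absurd ((congrArg pvKey3 h) ▸ hsfx_lt q hq) (lt_irrefl _)),
          List.append_nil]
    have hfilter_later : ∀ k ∈ PySem.Set.ofList (sfx.map (fun q => q.1)),
        (e :: rest).filter (fun q => q.1 == k) = sfx.filter (fun q => q.1 == k) := by
      intro k hk
      obtain ⟨q', hq', rfl⟩ := List.mem_map.mp ((PySem.Set.mem_ofList _ _).mp hk)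
      conv_lhs => rw [hLdecomp]
      rw [List.filter_append,
          List.filter_eq_nil_iff.mpr (fun q hq => by
            simp only [beq_iff_eq]
            intro h
            have h2 : pvKey3 e.1 = pvKey3 q'.1 := congrArg pvKey3 ((hrun_all q hq).symm.trans h)
            exact absurd (h2 ▸ hsfx_lt q' hq') (lt_irrefl _)),
          List.nil_append]
    have hset : PySem.Set.ofList ((e :: rest).map (fun q => q.1))
        = e.1 :: PySem.Set.ofList (sfx.map (fun q => q.1)) := by
      conv_lhs => rw [hLdecomp]
      rw [List.map_append]
      apply pvOfList_head
      · intro x hx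
        obtain ⟨q, hq, rfl⟩ := List.mem_map.mp hx
        exact hrun_all q hq
      · have hkv : e ∈ ((e :: rest)).takeWhile (fun q => q.1 == e.1) := by
          rw [List.takeWhile_cons, if_pos (by simp)]
          exact List.mem_cons_self ..
        intro hnil
        rw [List.map_eq_nil_iff.mp hnil] at hkv
        simp at hkv
      · intro hc
        obtain ⟨q, hq, hqe⟩ := List.mem_map.mp hc
        exact absurd ((congrArg pvKey3 hqe) ▸ hsfx_lt q hq) (lt_irrefl _)
    have hstep : pvMidLoop (e :: rest)
        = (e.1.2.1, e.1.2.2, (pvUrlFold (((e :: rest)).takeWhile (fun q => q.1 == e.1))).1,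
            (pvUrlFold (((e :: rest)).takeWhile (fun q => q.1 == e.1))).2) :: pvMidLoop sfx := by
      rw [pvMidLoop]
    have hrest' : sfx.Pairwise (fun p q => pvKey3 p.1 ≤ pvKey3 q.1) := by
      rw [hsfx_eq]; exact hrest_pw.sublist (List.dropWhile_sublist _)
    rw [hstep, ih hrest', hset, List.map_cons]
    refine congrArg₂ List.cons ?_ ?_
    · show (e.1.2.1, e.1.2.2, (pvUrlFold (((e :: rest)).takeWhile (fun q => q.1 == e.1))).1,
          (pvUrlFold (((e :: rest)).takeWhile (fun q => q.1 == e.1))).2)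
        = (e.1.2.1, e.1.2.2, (pvUrlFold ((e :: rest).filter (fun q => q.1 == e.1))).1,
            (pvUrlFold ((e :: rest).filter (fun q => q.1 == e.1))).2)
      rw [hfilter_k]
    · exact (List.map_congr_left (fun k hk => by rw [hfilter_later k hk])).symm

-- outer loop: on an ow-sorted list it emits one dict entry per distinct ow, in order
lemma pvOut_items (L : List ((String × String × String) × Int × Int × String))
    (out : PySem.Dict String (List (String × String × String × String)))
    (hpw : L.Pairwise (fun p q => p.1.1 ≤ q.1.1))
    (hd : ∀ p ∈ L, out.contains p.1.1 = false) :
    (pvOutLoop L out).items = out.items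
      ++ (PySem.Set.ofList (L.map (fun e => e.1.1))).map
          (fun ow => (ow, pvMidLoop (L.filter (fun q => q.1.1 == ow)))) := by
  revert hpw hd
  induction L, out using pvOutLoop.induct with
  | case1 out => intro _ _; simp [pvOutLoop]
  | case2 e rest out run sfx ih =>
    intro hs hd
    have hrun_eq : run = ((e :: rest)).takeWhile (fun q => q.1.1 == e.1.1) := rfl
    have hsfx_eq : sfx = rest.dropWhile (fun q => q.1.1 == e.1.1) := by
      show ((e :: rest)).dropWhile (fun q => q.1.1 == e.1.1) = _
      rw [List.dropWhile_cons, if_pos (by simp)]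
    have hrun_all : ∀ q ∈ run, q.1.1 = e.1.1 := by
      intro q hq
      have := List.mem_takeWhile_imp (hrun_eq ▸ hq)
      simpa using this
    obtain ⟨hz, hrest_pw⟩ := List.pairwise_cons.mp hs
    have hsfx_lt : ∀ q ∈ sfx, e.1.1 < q.1.1 := by
      rw [hsfx_eq]
      exact pvDropWhile_lt (fun q : (String × String × String) × Int × Int × String => q.1.1)
        (fun q => q.1.1) (fun x y => Iff.rfl) e rest hrest_pw hz
    have hsfx_sub : ∀ q ∈ sfx, q ∈ e :: rest := by
      intro q hq
      rw [hsfx_eq] at hq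
      exact List.mem_cons_of_mem _ ((List.dropWhile_sublist _).subset hq)
    have hkc : out.contains e.1.1 = false := hd e (List.mem_cons_self ..)
    have hLdecomp : e :: rest = run ++ sfx := by
      rw [hrun_eq]
      show _ = _ ++ ((e :: rest)).dropWhile (fun q => q.1.1 == e.1.1)
      rw [List.takeWhile_append_dropWhile]
    have hfilter_k : (e :: rest).filter (fun q => q.1.1 == e.1.1) = run := by
      conv_lhs => rw [hLdecomp]
      rw [List.filter_append,
          List.filter_eq_self.mpr (fun q hq => by simp [hrun_all q hq]),
          List.filter_eq_nil_iff.mpr (fun q hq => by simp [ne_of_gt (hsfx_lt q hq)]),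
          List.append_nil]
    have hfilter_ow : ∀ ow ∈ PySem.Set.ofList (sfx.map (fun q => q.1.1)),
        (e :: rest).filter (fun q => q.1.1 == ow) = sfx.filter (fun q => q.1.1 == ow) := by
      intro ow how
      obtain ⟨q', hq', rfl⟩ := List.mem_map.mp ((PySem.Set.mem_ofList _ _).mp how)
      conv_lhs => rw [hLdecomp]
      rw [List.filter_append,
          List.filter_eq_nil_iff.mpr (fun q hq => by
            simp only [beq_iff_eq]
            rw [hrun_all q hq]
            exact ne_of_lt (hsfx_lt q' hq')),
          List.nil_append]
    have hset : PySem.Set.ofList ((e :: rest).map (fun q => q.1.1))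
        = e.1.1 :: PySem.Set.ofList (sfx.map (fun q => q.1.1)) := by
      conv_lhs => rw [hLdecomp]
      rw [List.map_append]
      apply pvOfList_head
      · intro x hx
        obtain ⟨q, hq, rfl⟩ := List.mem_map.mp hx
        exact hrun_all q hq
      · have hkv : e ∈ run := by
          rw [hrun_eq, List.takeWhile_cons, if_pos (by simp)]
          exact List.mem_cons_self ..
        intro hnil
        rw [List.map_eq_nil_iff.mp hnil] at hkv
        simp at hkv
      · intro hc
        obtain ⟨q, hq, hqe⟩ := List.mem_map.mp hc
        exact absurd hqe (ne_of_gt (hsfx_lt q hq))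
    have hstep : pvOutLoop (e :: rest) out
        = pvOutLoop sfx (out.insert e.1.1 (pvMidLoop run)) := by
      rw [pvOutLoop]
    rw [hstep, ih (by rw [hsfx_eq]; exact hrest_pw.sublist (List.dropWhile_sublist _))
        (fun p hp => by
          rw [PySem.Dict.contains_insert]
          have h1 : (p.1.1 == e.1.1) = false := by simp [ne_of_gt (hsfx_lt p hp)]
          rw [h1, hd p (hsfx_sub p hp), Bool.or_self]),
      PySem.Dict.items_insert_of_not_contains _ _ hkc, hset, List.map_cons, hfilter_k]
    have hmapcong : List.map (fun ow => (ow, pvMidLoop (List.filter (fun q => q.1.1 == ow) (e :: rest))))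
          (PySem.Set.ofList (sfx.map (fun q => q.1.1)))
        = List.map (fun ow => (ow, pvMidLoop (List.filter (fun q => q.1.1 == ow) sfx)))
          (PySem.Set.ofList (sfx.map (fun q => q.1.1))) :=
      List.map_congr_left (fun ow how => by rw [hfilter_ow ow how])
    rw [hmapcong, List.append_assoc, List.singleton_append]

-- closed form of A's by_version fold (one entry per distinct ow, rows in list order)
lemma pvByv_items (l : List ((String × String × String) × PySem.Dict String String)) :
    (l.foldl (fun bv p => bv.modify p.1.1 ([] : List (String × String × String × String))
        (fun acc => acc ++ [(p.1.2.1, p.1.2.2, p.2.getD "opkg" "", p.2.getD "apk" "")])) PySem.Dict.empty).items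
    = (PySem.Set.ofList (l.map (fun p => p.1.1))).map
        (fun ow => (ow, (l.filter (fun p => p.1.1 == ow)).map
          (fun p => (p.1.2.1, p.1.2.2, p.2.getD "opkg" "", p.2.getD "apk" "")))) := by
  have hnd : (l.foldl (fun bv p => bv.modify p.1.1 ([] : List (String × String × String × String))
      (fun acc => acc ++ [(p.1.2.1, p.1.2.2, p.2.getD "opkg" "", p.2.getD "apk" "")])) PySem.Dict.empty).keys.Nodup := by
    exact PySem.Dict.nodup_keys_foldl_modify_key l (fun p => p.1.1) []
      (fun _ p => fun acc => acc ++ [(p.1.2.1, p.1.2.2, p.2.getD "opkg" "", p.2.getD "apk" "")]) PySem.Dict.empty (by simp)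
  rw [PySem.Dict.items_eq_map_keys _ hnd ([] : List (String × String × String × String))]
  have hkeys : (l.foldl (fun bv p => bv.modify p.1.1 ([] : List (String × String × String × String))
      (fun acc => acc ++ [(p.1.2.1, p.1.2.2, p.2.getD "opkg" "", p.2.getD "apk" "")])) PySem.Dict.empty).keys
      = PySem.Set.ofList (l.map (fun p => p.1.1)) := by
    rw [PySem.Dict.keys_foldl_modify_key l (fun p => p.1.1) []
      (fun _ p => fun acc => acc ++ [(p.1.2.1, p.1.2.2, p.2.getD "opkg" "", p.2.getD "apk" "")]) PySem.Dict.empty]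
    rw [PySem.Set.ofList_eq_foldl]
    rfl
  rw [hkeys]
  apply List.map_congr_left
  intro ow _
  have hfold : (l.foldl (fun bv p => bv.modify p.1.1 ([] : List (String × String × String × String))
        (fun acc => acc ++ [(p.1.2.1, p.1.2.2, p.2.getD "opkg" "", p.2.getD "apk" "")])) PySem.Dict.empty)
      = ((l.map (fun p => (p.1.1, (p.1.2.1, p.1.2.2, p.2.getD "opkg" "", p.2.getD "apk" "")))).foldl
        (fun d q => d.modify q.1 ([] : List (String × String × String × String)) (fun acc => acc ++ [q.2])) PySem.Dict.empty) := by
    rw [List.foldl_map]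
  rw [hfold, PySem.Dict.getD_foldl_modify_append, PySem.Dict.getD_empty, List.nil_append,
      List.filter_map, List.map_map]
  rfl

-- ---------- the decorated event lists ----------

lemma pvE0_src (l : List (String × String × String × String)) :
    ∀ e ∈ pvE0 l, e.2.1 = 0 := by
  intro e he
  obtain ⟨p, _, rfl⟩ := List.mem_map.mp he
  rfl

lemma pvE1_src (l : List (String × String × String × String)) :
    ∀ e ∈ pvE1 l, e.2.1 = 1 := by
  intro e he
  obtain ⟨p, _, rfl⟩ := List.mem_map.mp he
  rfl

lemma pvE0_idx (l : List (String × String × String × String)) :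
    (pvE0 l).Pairwise (fun e f => e.2.2.1 < f.2.2.1) := by
  unfold pvE0
  rw [List.pairwise_map]
  exact (PySem.List.pairwise_lt_enumerate l 0).imp (fun h => h)

lemma pvE1_idx (l : List (String × String × String × String)) :
    (pvE1 l).Pairwise (fun e f => e.2.2.1 < f.2.2.1) := by
  unfold pvE1
  rw [List.pairwise_map]
  exact (PySem.List.pairwise_lt_enumerate l 0).imp (fun h => h)

lemma pvEnum_keys (l : List (String × String × String × String)) (c : Int) (s : Int) :
    ((PySem.List.enumerate l s).map (fun p => ((p.2.1, p.2.2.1, p.2.2.2.1), c, p.1, p.2.2.2.2))).map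
      (fun e => e.1) = l.map (fun r => (r.1, r.2.1, r.2.2.1)) := by
  rw [List.map_map]
  have h : ((fun e : (String × String × String) × Int × Int × String => e.1) ∘
      (fun p : Int × (String × String × String × String) => ((p.2.1, p.2.2.1, p.2.2.2.1), c, p.1, p.2.2.2.2)))
      = (fun r : String × String × String × String => (r.1, r.2.1, r.2.2.1))
          ∘ (fun p : Int × (String × String × String × String) => p.2) := rfl
  rw [h, ← List.map_map, PySem.List.map_snd_enumerate]

lemma pvEnum_urls (l : List (String × String × String × String)) (c : Int) (k : String × String × String) :
    ∀ (s : Int),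
    (((PySem.List.enumerate l s).map (fun p => ((p.2.1, p.2.2.1, p.2.2.2.1), c, p.1, p.2.2.2.2))).filter
        (fun q => q.1 == k)).map (fun e => e.2.2.2)
      = (l.filter (fun r => ((r.1, r.2.1, r.2.2.1) : String × String × String) == k)).map (fun r => r.2.2.2) := by
  induction l with
  | nil => intro s; rfl
  | cons r t ih =>
    intro s
    simp only [PySem.List.enumerate_cons, List.map_cons, List.filter_cons]
    by_cases h : (((r.1, r.2.1, r.2.2.1) : String × String × String) == k) = true
    · simp [h, ih]
    · rw [Bool.not_eq_true] at h
      simp [h, ih]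

-- ---------- A's merged dict, looked up ----------

lemma pvG1 (k : String × String × String) :
    ∀ (l : List (String × String × String × String)) (d : PySem.Dict (String × String × String) (PySem.Dict String String)),
    ((l.foldl pvStepO d).getD k PySem.Dict.empty).getD "opkg" ""
      = ((l.filter (fun r => ((r.1, r.2.1, r.2.2.1) : String × String × String) == k)).map (fun r => r.2.2.2)).getLastD
          ((d.getD k PySem.Dict.empty).getD "opkg" "") := by
  intro l
  induction l with
  | nil => intro d; rfl
  | cons r t ih =>
    intro d
    rw [List.foldl_cons, List.filter_cons]
    by_cases h : ((r.1, r.2.1, r.2.2.1) : String × String × String) = k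
    · rw [if_pos (by simp [h]), List.map_cons, List.getLastD_cons, ih]
      congr 1
      unfold pvStepO
      rw [PySem.Dict.getD_modify, if_pos h.symm, PySem.Dict.getD_insert_self]
    · rw [if_neg (by simp [h]), ih]
      congr 1
      unfold pvStepO
      rw [PySem.Dict.getD_modify, if_neg (fun hk => h hk.symm)]

lemma pvG2 (k : String × String × String) :
    ∀ (l : List (String × String × String × String)) (d : PySem.Dict (String × String × String) (PySem.Dict String String)),
    ((l.foldl pvStepA d).getD k PySem.Dict.empty).getD "opkg" ""
      = (d.getD k PySem.Dict.empty).getD "opkg" "" := by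
  intro l
  induction l with
  | nil => intro d; rfl
  | cons r t ih =>
    intro d
    rw [List.foldl_cons, ih]
    unfold pvStepA
    by_cases h : ((r.1, r.2.1, r.2.2.1) : String × String × String) = k
    · rw [PySem.Dict.getD_modify, if_pos h.symm,
          PySem.Dict.getD_insert_of_ne _ _ _ (by decide : ("opkg" : String) ≠ "apk"), h]
    · rw [PySem.Dict.getD_modify, if_neg (fun hk => h hk.symm)]

lemma pvG3 (k : String × String × String) :
    ∀ (l : List (String × String × String × String)) (d : PySem.Dict (String × String × String) (PySem.Dict String String)),
    ((l.foldl pvStepA d).getD k PySem.Dict.empty).getD "apk" ""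
      = ((l.filter (fun r => ((r.1, r.2.1, r.2.2.1) : String × String × String) == k)).map (fun r => r.2.2.2)).getLastD
          ((d.getD k PySem.Dict.empty).getD "apk" "") := by
  intro l
  induction l with
  | nil => intro d; rfl
  | cons r t ih =>
    intro d
    rw [List.foldl_cons, List.filter_cons]
    by_cases h : ((r.1, r.2.1, r.2.2.1) : String × String × String) = k
    · rw [if_pos (by simp [h]), List.map_cons, List.getLastD_cons, ih]
      congr 1
      unfold pvStepA
      rw [PySem.Dict.getD_modify, if_pos h.symm, PySem.Dict.getD_insert_self]
    · rw [if_neg (by simp [h]), ih]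
      congr 1
      unfold pvStepA
      rw [PySem.Dict.getD_modify, if_neg (fun hk => h hk.symm)]

lemma pvG4 (k : String × String × String) :
    ∀ (l : List (String × String × String × String)) (d : PySem.Dict (String × String × String) (PySem.Dict String String)),
    ((l.foldl pvStepO d).getD k PySem.Dict.empty).getD "apk" ""
      = (d.getD k PySem.Dict.empty).getD "apk" "" := by
  intro l
  induction l with
  | nil => intro d; rfl
  | cons r t ih =>
    intro d
    rw [List.foldl_cons, ih]
    unfold pvStepO
    by_cases h : ((r.1, r.2.1, r.2.2.1) : String × String × String) = k
    · rw [PySem.Dict.getD_modify, if_pos h.symm,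
          PySem.Dict.getD_insert_of_ne _ _ _ (by decide : ("apk" : String) ≠ "opkg"), h]
    · rw [PySem.Dict.getD_modify, if_neg (fun hk => h hk.symm)]

-- ---------- sortedness and distinctness of the two sorted lists ----------

lemma pvM2_keys_nodup (o a : List (String × String × String × String)) : (pvM2 o a).keys.Nodup := by
  unfold pvM2 pvStepA pvStepO
  refine PySem.Dict.nodup_keys_foldl_modify_key a (fun r => (r.1, r.2.1, r.2.2.1)) PySem.Dict.empty
    (fun _ r => fun u => u.insert "apk" r.2.2.2) _ ?_
  exact PySem.Dict.nodup_keys_foldl_modify_key o (fun r => (r.1, r.2.1, r.2.2.1)) PySem.Dict.empty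
    (fun _ r => fun u => u.insert "opkg" r.2.2.2) PySem.Dict.empty (by simp)

lemma pvM2_keys_eq (o a : List (String × String × String × String)) :
    (pvM2 o a).keys = PySem.Set.ofList ((o ++ a).map (fun r => (r.1, r.2.1, r.2.2.1))) := by
  unfold pvM2 pvStepA pvStepO
  rw [PySem.Dict.keys_foldl_modify_key a (fun r => (r.1, r.2.1, r.2.2.1)) PySem.Dict.empty
        (fun _ r => fun u => u.insert "apk" r.2.2.2),
      PySem.Dict.keys_foldl_modify_key o (fun r => (r.1, r.2.1, r.2.2.1)) PySem.Dict.empty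
        (fun _ r => fun u => u.insert "opkg" r.2.2.2),
      List.map_append, PySem.Set.ofList_eq_foldl, List.foldl_append]
  rfl

lemma pvIts_perm_keys (o a : List (String × String × String × String)) :
    ((pvIts o a).map (fun p => p.1)).Perm (pvM2 o a).keys := by
  have h : (pvIts o a).Perm (pvM2 o a).items := by
    unfold pvIts; exact PySem.List.sorted_perm (pvM2 o a).items (fun p => pvKey3 p.1) false
  simpa [PySem.Dict.keys] using h.map (fun p => p.1)

lemma pvIts_pairwise (o a : List (String × String × String × String)) :
    (pvIts o a).Pairwise (fun p q => pvKey3 p.1 < pvKey3 q.1) := by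
  have hle : (pvIts o a).Pairwise (fun p q => pvKey3 p.1 ≤ pvKey3 q.1) := by
    unfold pvIts; exact PySem.List.sorted_pairwise _ _
  have hnd : ((pvIts o a).map (fun p => p.1)).Nodup :=
    ((pvIts_perm_keys o a).nodup_iff).mpr (pvM2_keys_nodup o a)
  have hne : (pvIts o a).Pairwise (fun p q => p.1 ≠ q.1) := List.pairwise_map.mp hnd
  exact (hle.and hne).imp (fun h => lt_of_le_of_ne h.1 (fun he => h.2 (pvKey3_inj he)))

lemma pvEvents_fk_ne (o a : List (String × String × String × String)) :
    ((pvE0 o) ++ (pvE1 a)).Pairwise (fun e f => pvFullKey e ≠ pvFullKey f) := by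
  rw [List.pairwise_append]
  refine ⟨(pvE0_idx o).imp (fun h hfk => ne_of_lt h (pvFullKey_parts hfk).2.2),
    (pvE1_idx a).imp (fun h hfk => ne_of_lt h (pvFullKey_parts hfk).2.2), ?_⟩
  intro e he f hf hfk
  have h1 := pvE0_src o e he
  have h2 := pvE1_src a f hf
  have h3 := (pvFullKey_parts hfk).2.1
  rw [h1, h2] at h3
  exact absurd h3 (by decide)

lemma pvEvs_perm (o a : List (String × String × String × String)) :
    (pvEvs o a).Perm (pvE0 o ++ pvE1 a) := by
  unfold pvEvs; exact PySem.List.sorted_perm (pvE0 o ++ pvE1 a) pvFullKey false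

lemma pvEvs_pairwise (o a : List (String × String × String × String)) :
    (pvEvs o a).Pairwise (fun e f => pvFullKey e < pvFullKey f) := by
  have hle : (pvEvs o a).Pairwise (fun e f => pvFullKey e ≤ pvFullKey f) := by
    unfold pvEvs; exact PySem.List.sorted_pairwise _ _
  have hnd : ((pvEvs o a).map pvFullKey).Nodup :=
    (((pvEvs_perm o a).map pvFullKey).nodup_iff).mpr (List.pairwise_map.mpr (pvEvents_fk_ne o a))
  have hne : (pvEvs o a).Pairwise (fun e f => pvFullKey e ≠ pvFullKey f) := List.pairwise_map.mp hnd
  exact (hle.and hne).imp (fun h => lt_of_le_of_ne h.1 h.2)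

-- ---------- membership characterisations ----------

lemma pvMem_its_keys (o a : List (String × String × String × String)) (x : String × String × String) :
    x ∈ (pvIts o a).map (fun p => p.1) ↔ x ∈ (o ++ a).map (fun r => (r.1, r.2.1, r.2.2.1)) := by
  rw [(pvIts_perm_keys o a).mem_iff, pvM2_keys_eq]
  exact PySem.Set.mem_ofList _ _

lemma pvMem_evs_keys (o a : List (String × String × String × String)) (x : String × String × String) :
    x ∈ (pvEvs o a).map (fun e => e.1) ↔ x ∈ (o ++ a).map (fun r => (r.1, r.2.1, r.2.2.1)) := by
  rw [((pvEvs_perm o a).map (fun e => e.1)).mem_iff, List.map_append, List.map_append]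
  unfold pvE0 pvE1
  rw [pvEnum_keys o 0 0, pvEnum_keys a 1 0]

lemma pvMem_its_ows (o a : List (String × String × String × String)) (x : String) :
    x ∈ (pvIts o a).map (fun p => p.1.1) ↔ ∃ r ∈ o ++ a, r.1 = x := by
  constructor
  · intro h
    obtain ⟨p, hp, rfl⟩ := List.mem_map.mp h
    obtain ⟨r, hr, hk⟩ := List.mem_map.mp ((pvMem_its_keys o a p.1).mp (List.mem_map.mpr ⟨p, hp, rfl⟩))
    exact ⟨r, hr, congrArg Prod.fst hk⟩
  · rintro ⟨r, hr, rfl⟩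
    obtain ⟨p, hp, hk⟩ := List.mem_map.mp ((pvMem_its_keys o a (r.1, r.2.1, r.2.2.1)).mpr
      (List.mem_map.mpr ⟨r, hr, rfl⟩))
    exact List.mem_map.mpr ⟨p, hp, congrArg Prod.fst hk⟩

lemma pvMem_evs_ows (o a : List (String × String × String × String)) (x : String) :
    x ∈ (pvEvs o a).map (fun e => e.1.1) ↔ ∃ r ∈ o ++ a, r.1 = x := by
  constructor
  · intro h
    obtain ⟨p, hp, rfl⟩ := List.mem_map.mp h
    obtain ⟨r, hr, hk⟩ := List.mem_map.mp ((pvMem_evs_keys o a p.1).mp (List.mem_map.mpr ⟨p, hp, rfl⟩))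
    exact ⟨r, hr, congrArg Prod.fst hk⟩
  · rintro ⟨r, hr, rfl⟩
    obtain ⟨p, hp, hk⟩ := List.mem_map.mp ((pvMem_evs_keys o a (r.1, r.2.1, r.2.2.1)).mpr
      (List.mem_map.mpr ⟨r, hr, rfl⟩))
    exact List.mem_map.mpr ⟨p, hp, congrArg Prod.fst hk⟩

lemma pvMem_filter_keys {γ : Type} (T : List ((String × String × String) × γ)) (ow : String)
    (x : String × String × String) :
    x ∈ (T.filter (fun p => p.1.1 == ow)).map (fun p => p.1) ↔ x.1 = ow ∧ x ∈ T.map (fun p => p.1) := by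
  constructor
  · intro h
    obtain ⟨e, he, rfl⟩ := List.mem_map.mp h
    exact ⟨by simpa using List.of_mem_filter he, List.mem_map.mpr ⟨e, List.mem_of_mem_filter he, rfl⟩⟩
  · rintro ⟨h1, h2⟩
    obtain ⟨e, he, rfl⟩ := List.mem_map.mp h2
    exact List.mem_map.mpr ⟨e, List.mem_filter.mpr ⟨he, by simpa using h1⟩, rfl⟩

-- ---------- the two sorted structures agree ----------

lemma pvOws_eq (o a : List (String × String × String × String)) :
    PySem.Set.ofList ((pvEvs o a).map (fun e => e.1.1))
      = PySem.Set.ofList ((pvIts o a).map (fun p => p.1.1)) := by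
  have h₁ := pvOfList_pairwise_lt (fun s : String => s) (fun _ _ h => h)
    ((pvEvs o a).map (fun e => e.1.1)).length ((pvEvs o a).map (fun e => e.1.1)) (le_refl _)
    (List.pairwise_map.mpr ((pvEvs_pairwise o a).imp
      (fun h => pvKey3_le_fst (pvFullKey_le_key3 (le_of_lt h)))))
  have h₂ := pvOfList_pairwise_lt (fun s : String => s) (fun _ _ h => h)
    ((pvIts o a).map (fun p => p.1.1)).length ((pvIts o a).map (fun p => p.1.1)) (le_refl _)
    (List.pairwise_map.mpr ((pvIts_pairwise o a).imp (fun h => pvKey3_le_fst (le_of_lt h))))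
  refine pvEqPw (fun s : String => s) ?_ h₁ h₂
  refine (List.perm_ext_iff_of_nodup (pvNodup_of_pairwise_lt _ h₂) (pvNodup_of_pairwise_lt _ h₁)).mpr ?_
  intro x
  rw [PySem.Set.mem_ofList, PySem.Set.mem_ofList, pvMem_its_ows, pvMem_evs_ows]

lemma pvKow_eq (o a : List (String × String × String × String)) (ow : String) :
    PySem.Set.ofList (((pvEvs o a).filter (fun q => q.1.1 == ow)).map (fun q => q.1))
      = ((pvIts o a).filter (fun p => p.1.1 == ow)).map (fun p => p.1) := by
  have hsrc : (((pvEvs o a).filter (fun q => q.1.1 == ow)).map (fun q => q.1)).Pairwise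
      (fun x y => pvKey3 x ≤ pvKey3 y) :=
    List.pairwise_map.mpr (((pvEvs_pairwise o a).sublist (List.filter_sublist)).imp
      (fun h => pvFullKey_le_key3 (le_of_lt h)))
  have h₁ := pvOfList_pairwise_lt pvKey3 (fun _ _ h => pvKey3_inj h)
    ((((pvEvs o a).filter (fun q => q.1.1 == ow)).map (fun q => q.1)).length)
    (((pvEvs o a).filter (fun q => q.1.1 == ow)).map (fun q => q.1)) (le_refl _) hsrc
  have h₂ : (((pvIts o a).filter (fun p => p.1.1 == ow)).map (fun p => p.1)).Pairwise
      (fun x y => pvKey3 x < pvKey3 y) :=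
    List.pairwise_map.mpr ((pvIts_pairwise o a).sublist (List.filter_sublist))
  refine pvEqPw pvKey3 ?_ h₁ h₂
  refine (List.perm_ext_iff_of_nodup (pvNodup_of_pairwise_lt _ h₂) (pvNodup_of_pairwise_lt _ h₁)).mpr ?_
  intro x
  simp only [PySem.Set.mem_ofList, pvMem_filter_keys, pvMem_its_keys, pvMem_evs_keys]

lemma pvEvs_filter_key (o a : List (String × String × String × String)) (k : String × String × String) :
    (pvEvs o a).filter (fun q => q.1 == k)
      = (pvE0 o).filter (fun q => q.1 == k) ++ (pvE1 a).filter (fun q => q.1 == k) := by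
  have hperm : ((pvE0 o).filter (fun q => q.1 == k) ++ (pvE1 a).filter (fun q => q.1 == k)).Perm
      ((pvEvs o a).filter (fun q => q.1 == k)) := by
    rw [← List.filter_append]
    exact ((pvEvs_perm o a).filter _).symm
  have h₁ : ((pvEvs o a).filter (fun q => q.1 == k)).Pairwise (fun e f => pvFullKey e < pvFullKey f) :=
    (pvEvs_pairwise o a).sublist (List.filter_sublist)
  have h₂ : (((pvE0 o).filter (fun q => q.1 == k)) ++ ((pvE1 a).filter (fun q => q.1 == k))).Pairwise
      (fun e f => pvFullKey e < pvFullKey f) := by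
    rw [List.pairwise_append]
    refine ⟨?_, ?_, ?_⟩
    · refine List.Pairwise.imp_of_mem ?_ ((pvE0_idx o).sublist (List.filter_sublist))
      intro e f he hf h
      have hek : e.1 = k := by simpa using List.of_mem_filter he
      have hfk : f.1 = k := by simpa using List.of_mem_filter hf
      exact pvFullKey_lt_of_idx (hek.trans hfk.symm)
        ((pvE0_src o e (List.mem_of_mem_filter he)).trans (pvE0_src o f (List.mem_of_mem_filter hf)).symm) h
    · refine List.Pairwise.imp_of_mem ?_ ((pvE1_idx a).sublist (List.filter_sublist))
      intro e f he hf h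
      have hek : e.1 = k := by simpa using List.of_mem_filter he
      have hfk : f.1 = k := by simpa using List.of_mem_filter hf
      exact pvFullKey_lt_of_idx (hek.trans hfk.symm)
        ((pvE1_src a e (List.mem_of_mem_filter he)).trans (pvE1_src a f (List.mem_of_mem_filter hf)).symm) h
    · intro e he f hf
      have hek : e.1 = k := by simpa using List.of_mem_filter he
      have hfk : f.1 = k := by simpa using List.of_mem_filter hf
      refine pvFullKey_lt_of_src (hek.trans hfk.symm) ?_
      rw [pvE0_src o e (List.mem_of_mem_filter he), pvE1_src a f (List.mem_of_mem_filter hf)]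
      decide
  exact pvEqPw pvFullKey hperm h₁ h₂

-- ---------- the url pair of one key ----------

lemma pvU0 : ∀ (xs : List ((String × String × String) × Int × Int × String)) (p : String × String),
    (∀ e ∈ xs, e.2.1 = 0) →
    xs.foldl pvUrlStep p = ((xs.map (fun e => e.2.2.2)).getLastD p.1, p.2) := by
  intro xs
  induction xs with
  | nil => intro p _; rfl
  | cons e t ih =>
    intro p h
    rw [List.foldl_cons, List.map_cons, List.getLastD_cons]
    have he : pvUrlStep p e = (e.2.2.2, p.2) := by
      unfold pvUrlStep
      rw [if_pos (by simp [h e (List.mem_cons_self ..)])]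
    rw [he, ih _ (fun f hf => h f (List.mem_cons_of_mem _ hf))]

lemma pvU1 : ∀ (ys : List ((String × String × String) × Int × Int × String)) (p : String × String),
    (∀ e ∈ ys, e.2.1 = 1) →
    ys.foldl pvUrlStep p = (p.1, (ys.map (fun e => e.2.2.2)).getLastD p.2) := by
  intro ys
  induction ys with
  | nil => intro p _; rfl
  | cons e t ih =>
    intro p h
    rw [List.foldl_cons, List.map_cons, List.getLastD_cons]
    have he : pvUrlStep p e = (p.1, e.2.2.2) := by
      unfold pvUrlStep
      rw [if_neg (by simp [h e (List.mem_cons_self ..)])]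
    rw [he, ih _ (fun f hf => h f (List.mem_cons_of_mem _ hf))]

lemma pvUrl_split (xs ys : List ((String × String × String) × Int × Int × String))
    (hx : ∀ e ∈ xs, e.2.1 = 0) (hy : ∀ e ∈ ys, e.2.1 = 1) :
    pvUrlFold (xs ++ ys) = ((xs.map (fun e => e.2.2.2)).getLastD "", (ys.map (fun e => e.2.2.2)).getLastD "") := by
  unfold pvUrlFold
  rw [List.foldl_append, pvU0 xs _ hx, pvU1 ys _ hy]

lemma pvUrl_m2 (o a : List (String × String × String × String)) (k : String × String × String) :
    pvUrlFold ((pvEvs o a).filter (fun q => q.1 == k))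
      = (((pvM2 o a).getD k PySem.Dict.empty).getD "opkg" "",
         ((pvM2 o a).getD k PySem.Dict.empty).getD "apk" "") := by
  rw [pvEvs_filter_key,
      pvUrl_split _ _ (fun e he => pvE0_src o e (List.mem_of_mem_filter he))
        (fun e he => pvE1_src a e (List.mem_of_mem_filter he))]
  unfold pvE0 pvE1 pvM2
  rw [pvEnum_urls o 0 k 0, pvEnum_urls a 1 k 0, pvG2 k a _, pvG1 k o _, pvG3 k a _, pvG4 k o _]
  simp [PySem.Dict.getD_empty]

-- ---------- per-ow row lists agree ----------

lemma pvVal_eq (o a : List (String × String × String × String)) :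
    ∀ p ∈ pvIts o a, p.2 = (pvM2 o a).getD p.1 PySem.Dict.empty := by
  intro p hp
  have hp' : p ∈ (pvM2 o a).items := by
    unfold pvIts at hp
    exact (PySem.List.mem_sorted _ _ _ _).mp hp
  exact (PySem.Dict.getD_of_mem_items _ hp' (pvM2_keys_nodup o a) PySem.Dict.empty).symm

lemma pvPerOw (o a : List (String × String × String × String)) (ow : String) :
    ((pvIts o a).filter (fun p => p.1.1 == ow)).map
        (fun p => (p.1.2.1, p.1.2.2, p.2.getD "opkg" "", p.2.getD "apk" ""))
      = pvMidLoop ((pvEvs o a).filter (fun q => q.1.1 == ow)) := by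
  have hpwf : ((pvEvs o a).filter (fun q => q.1.1 == ow)).Pairwise (fun p q => pvKey3 p.1 ≤ pvKey3 q.1) :=
    ((pvEvs_pairwise o a).sublist (List.filter_sublist)).imp (fun h => pvFullKey_le_key3 (le_of_lt h))
  rw [pvMid_eq _ hpwf, pvKow_eq]
  rw [List.map_congr_left (fun p hp => by
    rw [pvVal_eq o a p (List.mem_of_mem_filter hp)] :
    ∀ p ∈ (pvIts o a).filter (fun p => p.1.1 == ow),
      (p.1.2.1, p.1.2.2, p.2.getD "opkg" "", p.2.getD "apk" "")
        = (p.1.2.1, p.1.2.2, ((pvM2 o a).getD p.1 PySem.Dict.empty).getD "opkg" "",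
            ((pvM2 o a).getD p.1 PySem.Dict.empty).getD "apk" ""))]
  rw [show (fun p : (String × String × String) × PySem.Dict String String =>
      (p.1.2.1, p.1.2.2, ((pvM2 o a).getD p.1 PySem.Dict.empty).getD "opkg" "",
        ((pvM2 o a).getD p.1 PySem.Dict.empty).getD "apk" ""))
      = (fun k : String × String × String =>
          (k.2.1, k.2.2, ((pvM2 o a).getD k PySem.Dict.empty).getD "opkg" "",
            ((pvM2 o a).getD k PySem.Dict.empty).getD "apk" ""))
        ∘ (fun p : (String × String × String) × PySem.Dict String String => p.1) from rfl,
    ← List.map_map]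
  refine List.map_congr_left ?_
  intro k hk
  have hk1 : k.1 = ow := by
    obtain ⟨p, hp, rfl⟩ := List.mem_map.mp hk
    simpa using List.of_mem_filter hp
  have hcol : ((pvEvs o a).filter (fun q => q.1.1 == ow)).filter (fun q => q.1 == k)
      = (pvEvs o a).filter (fun q => q.1 == k) := by
    rw [List.filter_filter]
    refine List.filter_congr ?_
    intro e _
    by_cases he : (e.1 == k) = true
    · have h1 : e.1.1 = ow := by rw [(by simpa using he : e.1 = k), hk1]
      simp [he, h1]
    · rw [Bool.not_eq_true] at he
      simp [he]
  rw [hcol, pvUrl_m2]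

-- ===== VERDICT (by name: the statement is the Claim_ definition above) =====
theorem group_rolling_rows_spec : Claim_equal_group_rolling_rows := by
  intro o a _
  show group_rolling_rows o a = group_rolling_rows_alt o a
  rw [pvA_closed, pvB_closed, pvByv_items,
      pvOut_items (pvEvs o a) PySem.Dict.empty
        ((pvEvs_pairwise o a).imp (fun h => pvKey3_le_fst (pvFullKey_le_key3 (le_of_lt h))))
        (fun p _ => rfl),
      show (PySem.Dict.empty : PySem.Dict String (List (String × String × String × String))).items = [] from rfl,
      List.nil_append, pvOws_eq]
  refine List.map_congr_left ?_
  intro ow _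
  exact congrArg (Prod.mk ow) (pvPerOw o a ow)
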